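-- pv_equiv track=rewrite | github.com/TeamGraphix/graphix | graphix/pattern.py | xor_combination_list
-- ===== SOURCE A (Python) =====
-- def xor_combination_list(list1, list2):
--     """Combine two lists according to XOR operation.
--
--     Parameters
--     ----------
--     list1 : list
--         list to be combined
--     list2 : list
--         list to be combined
--
--     Returns
--     -------
--     result : list
--         xor-combined list
--     """
--     result = list2
--     for elem in list1:
--         if elem in result:
--             result.remove(elem)
--         else:
--             result.append(elem)
--     return result
-- ===== SOURCE B (Python) =====
-- def xor_combination_list(list1, list2):
--     """Combine two lists according to XOR operation (counting-based, one pass).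
--
--     Returns the same value as the naive remove/append loop, in O(n + m):
--     count occurrences instead of scanning `result` for every element.
--     Note: unlike A, this does not mutate list2 in place.
--     """
--     avail = {}                      # occurrences of list2 still removable
--     for v in list2:
--         avail[v] = avail.get(v, 0) + 1
--     rem = {}                        # removals charged to list2 occurrences
--     app = []                        # elements appended by the loop, in order
--     appcnt = {}                     # occurrences of app still present
--     drop = {}                       # removals charged to app occurrences
--     for v in list1:
--         if avail.get(v, 0) > 0:
--             avail[v] = avail[v] - 1
--             rem[v] = rem.get(v, 0) + 1
--         elif appcnt.get(v, 0) > 0: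
--             appcnt[v] = appcnt[v] - 1
--             drop[v] = drop.get(v, 0) + 1
--         else:
--             app.append(v)
--             appcnt[v] = appcnt.get(v, 0) + 1
--     out = []
--     seen = {}
--     for v in list2:                 # keep all but the first rem[v] occurrences
--         seen[v] = seen.get(v, 0) + 1
--         if seen[v] > rem.get(v, 0):
--             out.append(v)
--     seen = {}
--     for v in app:                   # keep all but the first drop[v] occurrences
--         seen[v] = seen.get(v, 0) + 1
--         if seen[v] > drop.get(v, 0):
--             out.append(v)
--     return out
-- ===== Notes on version B (the rewrite author's own statement) =====
-- stated objective: faster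
-- what changed: Replaced the per-element linear membership/remove scan of the growing result list by occurrence counters (dicts) built in one pass, plus a final counted rebuild of the surviving list2 and appended elements, removing the inner O(m) scan.
import Mathlib
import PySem

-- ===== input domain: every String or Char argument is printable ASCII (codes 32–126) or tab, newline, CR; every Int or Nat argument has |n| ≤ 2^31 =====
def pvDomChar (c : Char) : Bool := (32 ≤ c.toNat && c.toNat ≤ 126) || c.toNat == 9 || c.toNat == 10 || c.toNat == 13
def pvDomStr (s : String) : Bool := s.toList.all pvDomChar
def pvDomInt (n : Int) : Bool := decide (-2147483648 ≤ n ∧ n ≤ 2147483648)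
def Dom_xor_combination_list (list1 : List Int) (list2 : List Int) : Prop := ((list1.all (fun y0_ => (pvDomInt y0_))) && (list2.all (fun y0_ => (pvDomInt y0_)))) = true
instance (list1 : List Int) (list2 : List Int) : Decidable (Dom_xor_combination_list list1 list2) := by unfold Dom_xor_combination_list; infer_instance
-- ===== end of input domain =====

-- B replaces A's O(n*m) membership/remove scans by O(n+m) occurrence counting; equivalence is
-- about the RETURN value only (A mutates list2 in place, B does not).

-- ===== PORT A =====
def xor_combination_list (list1 : List Int) (list2 : List Int) : List Int :=
  list1.foldl
    (fun result elem =>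
      if elem ∈ result then (PySem.List.remove? result elem).getD result
      else result ++ [elem])
    list2

-- ===== PORT B =====
-- state of Source B's main loop: (avail, rem, app, appcnt, drop)
def pvBState : Type :=
  PySem.Dict Int Int × PySem.Dict Int Int × List Int × PySem.Dict Int Int × PySem.Dict Int Int

def pvBStep (s : pvBState) (v : Int) : pvBState :=
  match s with
  | (avail, rem, app, appcnt, drop) =>
    if 0 < avail.getD v 0 then
      (avail.insert v (avail.getD v 0 - 1), rem.insert v (rem.getD v 0 + 1), app, appcnt, drop)
    else if 0 < appcnt.getD v 0 then
      (avail, rem, app, appcnt.insert v (appcnt.getD v 0 - 1), drop.insert v (drop.getD v 0 + 1))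
    else
      (avail, rem, app ++ [v], appcnt.insert v (appcnt.getD v 0 + 1), drop)

-- one step of Source B's rebuild loops ("seen[v] += 1; if seen[v] > cnt.get(v,0): out.append(v)")
def pvBKeep (cnt : PySem.Dict Int Int) (p : PySem.Dict Int Int × List Int) (v : Int) :
    PySem.Dict Int Int × List Int :=
  let seen := p.1.insert v (p.1.getD v 0 + 1)
  if cnt.getD v 0 < seen.getD v 0 then (seen, p.2 ++ [v]) else (seen, p.2)

def xor_combination_list_alt (list1 : List Int) (list2 : List Int) : List Int :=
  -- avail := counter of list2 (first loop of Source B), then the main loop, then the two rebuild loops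
  match list1.foldl pvBStep
      (list2.foldl (fun d v => d.insert v (d.getD v 0 + 1)) PySem.Dict.empty,
       PySem.Dict.empty, ([] : List Int), PySem.Dict.empty, PySem.Dict.empty) with
  | (_, rem, app, _, drop) =>
    (app.foldl (pvBKeep drop)
      (PySem.Dict.empty, (list2.foldl (pvBKeep rem) (PySem.Dict.empty, ([] : List Int))).2)).2

-- ===== PRECONDITION & SPEC =====
def Spec_xor_combination_list (list1 : List Int) (list2 : List Int) (out : List Int) : Prop := out = xor_combination_list_alt list1 list2
instance (list1 : List Int) (list2 : List Int) (out : List Int) : Decidable (Spec_xor_combination_list list1 list2 out) := by unfold Spec_xor_combination_list; infer_instance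

-- ===== CLAIM (what is proved, stated in full; the proofs are below) =====
def Claim_equal_xor_combination_list : Prop := ∀ (list1 : List Int) (list2 : List Int), Dom_xor_combination_list list1 list2 → Spec_xor_combination_list list1 list2 (xor_combination_list list1 list2)

-- ===== LEMMAS AND PROOFS =====

-- "filter-drop": drop the first (d v) occurrences of each value v, keep the rest in order.
def pvFd : List Int → (Int → Int) → List Int
  | [], _ => []
  | x :: xs, d =>
    if 0 < d x then pvFd xs (fun w => if w = x then d w - 1 else d w)
    else x :: pvFd xs d

theorem pvFd_cons_pos (x : Int) (xs : List Int) (d : Int → Int) (h : 0 < d x) :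
    pvFd (x :: xs) d = pvFd xs (fun w => if w = x then d w - 1 else d w) := by
  simp only [pvFd, if_pos h]

theorem pvFd_cons_nonpos (x : Int) (xs : List Int) (d : Int → Int) (h : ¬ 0 < d x) :
    pvFd (x :: xs) d = x :: pvFd xs d := by
  simp only [pvFd, if_neg h]

theorem pvFd_congr (l : List Int) (d d' : Int → Int)
    (h : ∀ v, d v = d' v ∨ (d v ≤ 0 ∧ d' v ≤ 0)) : pvFd l d = pvFd l d' := by
  induction l generalizing d d' with
  | nil => rfl
  | cons x xs ih =>
    have hx := h x
    by_cases hpos : 0 < d x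
    · have hpos' : 0 < d' x := by rcases hx with h1 | h1 <;> omega
      rw [pvFd_cons_pos _ _ _ hpos, pvFd_cons_pos _ _ _ hpos']
      exact ih _ _ (fun v => by rcases h v with h1 | h1 <;> [left; right] <;> (first | simp [h1] | (constructor <;> split <;> omega)))
    · have hpos' : ¬ 0 < d' x := by rcases hx with h1 | h1 <;> omega
      rw [pvFd_cons_nonpos _ _ _ hpos, pvFd_cons_nonpos _ _ _ hpos']
      exact congrArg _ (ih _ _ h)

theorem pvFd_count (l : List Int) (d : Int → Int) (v : Int) (hv : 0 ≤ d v) :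
    ((pvFd l d).count v : Int) = max ((l.count v : Int) - d v) 0 := by
  induction l generalizing d with
  | nil => simp [pvFd]; omega
  | cons x xs ih =>
    by_cases hpos : 0 < d x
    · rw [pvFd_cons_pos _ _ _ hpos]
      by_cases hxv : x = v
      · subst hxv
        rw [ih (fun w => if w = x then d w - 1 else d w) (by simp; omega)]
        simp [List.count_cons]
        omega
      · rw [ih (fun w => if w = x then d w - 1 else d w) (by simp [Ne.symm hxv]; omega)]
        simp [List.count_cons, Ne.symm hxv, hxv]
    · rw [pvFd_cons_nonpos _ _ _ hpos]
      have hxs := ih d hv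
      by_cases hxv : x = v
      · subst hxv
        simp [List.count_cons] at hxs ⊢
        omega
      · simp [List.count_cons, Ne.symm hxv, hxv] at hxs ⊢
        omega

theorem pvFd_mem (l : List Int) (d : Int → Int) (v : Int) (hv : 0 ≤ d v) :
    v ∈ pvFd l d ↔ d v < (l.count v : Int) := by
  rw [← List.count_pos_iff]
  have := pvFd_count l d v hv
  omega

theorem pvFd_remove (l : List Int) (d : Int → Int) (v : Int) (hv : 0 ≤ d v)
    (hlt : d v < (l.count v : Int)) :
    PySem.List.remove? (pvFd l d) v = some (pvFd l (fun w => if w = v then d w + 1 else d w)) := by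
  induction l generalizing d with
  | nil => simp at hlt; omega
  | cons x xs ih =>
    by_cases hxv : x = v
    · subst hxv
      have h1 : 0 < (fun w => if w = x then d w + 1 else d w) x := by simp; omega
      rw [pvFd_cons_pos x xs (fun w => if w = x then d w + 1 else d w) h1]
      by_cases hpos : 0 < d x
      · rw [pvFd_cons_pos x xs d hpos]
        have hcnt : (fun w => if w = x then d w - 1 else d w) x < (xs.count x : Int) := by
          simp [List.count_cons] at hlt ⊢; omega
        rw [ih _ (by simp; omega) hcnt]
        congr 1
        apply pvFd_congr
        intro w
        by_cases hw : w = x <;> simp [hw]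
      · rw [pvFd_cons_nonpos x xs d hpos, PySem.List.remove?_cons_self]
        congr 1
        apply pvFd_congr
        intro w
        by_cases hw : w = x <;> simp [hw] <;> omega
    · have hcnt : d v < (xs.count v : Int) := by
        simp [List.count_cons] at hlt; rw [if_neg hxv] at hlt; omega
      by_cases hpos : 0 < d x
      · rw [pvFd_cons_pos x xs d hpos]
        have h1 : 0 < (fun w => if w = v then d w + 1 else d w) x := by simp [hxv]; omega
        rw [pvFd_cons_pos x xs (fun w => if w = v then d w + 1 else d w) h1]
        have hv' : 0 ≤ (fun w => if w = x then d w - 1 else d w) v := by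
          simp [Ne.symm hxv]; omega
        have hcnt' : (fun w => if w = x then d w - 1 else d w) v < (xs.count v : Int) := by
          simp [Ne.symm hxv]; exact hcnt
        rw [ih _ hv' hcnt']
        congr 1
        apply pvFd_congr
        intro w
        by_cases hw1 : w = v <;> by_cases hw2 : w = x <;> simp [hw1, hw2] <;> omega
      · rw [pvFd_cons_nonpos x xs d hpos, PySem.List.remove?_cons_of_ne _ hxv, ih d hv hcnt]
        have h1 : ¬ 0 < (fun w => if w = v then d w + 1 else d w) x := by simp [hxv]; omega
        rw [pvFd_cons_nonpos x xs (fun w => if w = v then d w + 1 else d w) h1]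
        simp

theorem pvFd_append_singleton (l : List Int) (x : Int) (d : Int → Int)
    (h : d x ≤ (l.count x : Int)) : pvFd (l ++ [x]) d = pvFd l d ++ [x] := by
  induction l generalizing d with
  | nil =>
    simp only [List.count_nil, Int.natCast_zero] at h
    simp [pvFd, show ¬ 0 < d x from by omega]
  | cons y ys ih =>
    by_cases hpos : 0 < d y
    · rw [List.cons_append, pvFd_cons_pos y _ d hpos, pvFd_cons_pos y ys d hpos]
      apply ih
      by_cases hyx : y = x
      · subst hyx; simp [List.count_cons] at h ⊢; omega
      · simp [Ne.symm hyx, hyx, List.count_cons] at h ⊢; omega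
    · rw [List.cons_append, pvFd_cons_nonpos y _ d hpos, pvFd_cons_nonpos y ys d hpos]
      rw [ih, List.cons_append]
      by_cases hyx : y = x
      · subst hyx
        have h2 : (0 : Int) ≤ ys.count y := by positivity
        omega
      · simp [List.count_cons, Ne.symm hyx, hyx] at h ⊢; omega

theorem pvFd_of_nonpos (l : List Int) (d : Int → Int) (h : ∀ v, d v ≤ 0) :
    pvFd l d = l := by
  induction l generalizing d with
  | nil => rfl
  | cons x xs ih =>
    rw [pvFd_cons_nonpos x xs d (by have := h x; omega), ih d h]

theorem pvRemove_append_left (A B : List Int) (v : Int) (A' : List Int)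
    (h : PySem.List.remove? A v = some A') :
    PySem.List.remove? (A ++ B) v = some (A' ++ B) := by
  induction A generalizing A' with
  | nil =>
    rw [(PySem.List.remove?_eq_none_iff _ v).2 (by simp)] at h
    cases h
  | cons x xs ih =>
    by_cases hxv : x = v
    · subst hxv
      rw [PySem.List.remove?_cons_self x xs] at h
      cases h
      rw [List.cons_append, PySem.List.remove?_cons_self x (xs ++ B)]
    · rw [PySem.List.remove?_cons_of_ne xs hxv] at h
      cases h' : PySem.List.remove? xs v with
      | none => rw [h'] at h; simp at h
      | some r =>
        rw [h'] at h; simp at h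
        rw [List.cons_append, PySem.List.remove?_cons_of_ne (xs ++ B) hxv, ih r h']
        simp [← h]

theorem pvRemove_append_right (A B : List Int) (v : Int) (hv : v ∉ A) :
    PySem.List.remove? (A ++ B) v = (PySem.List.remove? B v).map (A ++ ·) := by
  induction A with
  | nil => simp
  | cons x xs ih =>
    have hxv : x ≠ v := fun h => hv (h ▸ List.mem_cons_self)
    rw [List.cons_append, PySem.List.remove?_cons_of_ne (xs ++ B) hxv,
        ih (fun h => hv (List.mem_cons_of_mem _ h))]
    cases PySem.List.remove? B v <;> simp

-- Source B's rebuild loop computes pvFd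
theorem pvRebuild_eq (cnt : PySem.Dict Int Int) (l : List Int) :
    ∀ (seen : PySem.Dict Int Int) (out : List Int),
    (l.foldl (pvBKeep cnt) (seen, out)).2
      = out ++ pvFd l (fun v => cnt.getD v 0 - seen.getD v 0) := by
  induction l with
  | nil => intro seen out; simp [pvFd]
  | cons x xs ih =>
    intro seen out
    rw [List.foldl_cons]
    show (xs.foldl (pvBKeep cnt) (pvBKeep cnt (seen, out) x)).2 = _
    by_cases hpos : 0 < cnt.getD x 0 - seen.getD x 0
    · -- fd drops x; rebuild does not append
      have hcond : ¬ cnt.getD x 0 < (seen.insert x (seen.getD x 0 + 1)).getD x 0 := by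
        rw [PySem.Dict.getD_insert]; simp; omega
      simp only [pvBKeep, if_neg hcond]
      rw [ih]
      simp only [pvFd, if_pos hpos]
      congr 1
      apply pvFd_congr
      intro v
      left
      rw [PySem.Dict.getD_insert]
      by_cases hv : v = x <;> simp [hv] <;> omega
    · -- fd keeps x; rebuild appends
      have hcond : cnt.getD x 0 < (seen.insert x (seen.getD x 0 + 1)).getD x 0 := by
        rw [PySem.Dict.getD_insert]; simp; omega
      simp only [pvBKeep, if_pos hcond]
      rw [ih]
      simp only [pvFd, if_neg hpos]
      rw [List.append_assoc, List.singleton_append]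
      congr 2
      apply pvFd_congr
      intro v
      rw [PySem.Dict.getD_insert]
      by_cases hv : v = x
      · subst hv; right; simp; omega
      · left; simp [hv]

-- the main loop invariant: A's result is the survivors of list2 followed by the survivors of app
theorem pvLoop_eq (L2 : List Int) (l1 : List Int) :
    ∀ (avail rem appcnt drop : PySem.Dict Int Int) (app R : List Int),
    (∀ v, 0 ≤ rem.getD v 0) →
    (∀ v, avail.getD v 0 = (L2.count v : Int) - rem.getD v 0) →
    (∀ v, 0 ≤ avail.getD v 0) →
    (∀ v, 0 ≤ drop.getD v 0) →
    (∀ v, appcnt.getD v 0 = (app.count v : Int) - drop.getD v 0) →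
    (∀ v, 0 ≤ appcnt.getD v 0) →
    R = pvFd L2 (fun v => rem.getD v 0) ++ pvFd app (fun v => drop.getD v 0) →
    l1.foldl
      (fun result elem =>
        if elem ∈ result then (PySem.List.remove? result elem).getD result
        else result ++ [elem]) R
    = (match l1.foldl pvBStep (avail, rem, app, appcnt, drop) with
       | (_, rem', app', _, drop') =>
         pvFd L2 (fun v => rem'.getD v 0) ++ pvFd app' (fun v => drop'.getD v 0)) := by
  induction l1 with
  | nil =>
    intro avail rem appcnt drop app R _ _ _ _ _ _ hR
    simpa using hR
  | cons v l1 ih =>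
    intro avail rem appcnt drop app R h1 h2 h3 h4 h5 h6 hR
    rw [List.foldl_cons, List.foldl_cons]
    by_cases hc1 : 0 < avail.getD v 0
    · -- remove from the list2 part
      have hlt : rem.getD v 0 < (L2.count v : Int) := by have := h2 v; omega
      have hrm := pvFd_remove L2 (fun w => rem.getD w 0) v (h1 v) hlt
      have hmem1 : v ∈ pvFd L2 (fun w => rem.getD w 0) := (pvFd_mem L2 (fun w => rem.getD w 0) v (h1 v)).2 hlt
      have hmem : v ∈ R := hR ▸ List.mem_append_left _ hmem1
      have hrmR : PySem.List.remove? R v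
          = some (pvFd L2 (fun w => if w = v then rem.getD w 0 + 1 else rem.getD w 0)
                   ++ pvFd app (fun w => drop.getD w 0)) := by
        rw [hR]; exact pvRemove_append_left _ _ _ _ hrm
      rw [if_pos hmem, hrmR]
      show _ = (match List.foldl pvBStep (pvBStep (avail, rem, app, appcnt, drop) v) l1 with
        | (_, rem', app', _, drop') => _)
      rw [show pvBStep (avail, rem, app, appcnt, drop) v
            = (avail.insert v (avail.getD v 0 - 1), rem.insert v (rem.getD v 0 + 1), app, appcnt, drop) from by
            simp [pvBStep, if_pos hc1]]
      rw [Option.getD_some]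
      apply ih
      · intro w; rw [PySem.Dict.getD_insert]; split <;> [skip; exact h1 w] <;> have := h1 v <;> omega
      · intro w; rw [PySem.Dict.getD_insert, PySem.Dict.getD_insert]
        split <;> [subst_vars; skip] <;> simp_all <;> omega
      · intro w; rw [PySem.Dict.getD_insert]; split <;> [omega; exact h3 w]
      · exact h4
      · exact h5
      · exact h6
      · congr 1
        apply pvFd_congr
        intro w
        left
        rw [PySem.Dict.getD_insert]
        by_cases hw : w = v <;> simp [hw]
    · by_cases hc2 : 0 < appcnt.getD v 0
      · -- remove from the appended part
        have hav0 : avail.getD v 0 = 0 := by have := h3 v; omega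
        have hnm1 : v ∉ pvFd L2 (fun w => rem.getD w 0) := by
          rw [pvFd_mem L2 (fun w => rem.getD w 0) v (h1 v)]; have := h2 v; omega
        have hlt : drop.getD v 0 < (app.count v : Int) := by have := h5 v; omega
        have hrm := pvFd_remove app (fun w => drop.getD w 0) v (h4 v) hlt
        have hmem2 : v ∈ pvFd app (fun w => drop.getD w 0) := (pvFd_mem app (fun w => drop.getD w 0) v (h4 v)).2 hlt
        have hmem : v ∈ R := hR ▸ List.mem_append_right _ hmem2
        have hrmR : PySem.List.remove? R v
            = some (pvFd L2 (fun w => rem.getD w 0)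
                     ++ pvFd app (fun w => if w = v then drop.getD w 0 + 1 else drop.getD w 0)) := by
          rw [hR, pvRemove_append_right _ _ _ hnm1, hrm, Option.map_some]
        rw [if_pos hmem, hrmR]
        show _ = (match List.foldl pvBStep (pvBStep (avail, rem, app, appcnt, drop) v) l1 with
          | (_, rem', app', _, drop') => _)
        rw [show pvBStep (avail, rem, app, appcnt, drop) v
              = (avail, rem, app, appcnt.insert v (appcnt.getD v 0 - 1), drop.insert v (drop.getD v 0 + 1)) from by
              simp [pvBStep, if_neg hc1, if_pos hc2]]
        rw [Option.getD_some]
        apply ih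
        · exact h1
        · exact h2
        · exact h3
        · intro w; rw [PySem.Dict.getD_insert]; split <;> [skip; exact h4 w] <;> have := h4 v <;> omega
        · intro w; rw [PySem.Dict.getD_insert, PySem.Dict.getD_insert]
          split <;> [subst_vars; skip] <;> simp_all <;> omega
        · intro w; rw [PySem.Dict.getD_insert]; split <;> [omega; exact h6 w]
        · congr 1
          apply pvFd_congr
          intro w
          left
          rw [PySem.Dict.getD_insert]
          by_cases hw : w = v <;> simp [hw]
      · -- append
        have hav0 : avail.getD v 0 = 0 := by have := h3 v; omega
        have hac0 : appcnt.getD v 0 = 0 := by have := h6 v; omega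
        have hnm1 : v ∉ pvFd L2 (fun w => rem.getD w 0) := by
          rw [pvFd_mem L2 (fun w => rem.getD w 0) v (h1 v)]; have := h2 v; omega
        have hnm2 : v ∉ pvFd app (fun w => drop.getD w 0) := by
          rw [pvFd_mem app (fun w => drop.getD w 0) v (h4 v)]; have := h5 v; omega
        have hnm : v ∉ R := by
          rw [hR]; intro h; rcases List.mem_append.1 h with h | h <;> [exact hnm1 h; exact hnm2 h]
        rw [if_neg hnm]
        show _ = (match List.foldl pvBStep (pvBStep (avail, rem, app, appcnt, drop) v) l1 with
          | (_, rem', app', _, drop') => _)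
        rw [show pvBStep (avail, rem, app, appcnt, drop) v
              = (avail, rem, app ++ [v], appcnt.insert v (appcnt.getD v 0 + 1), drop) from by
              simp [pvBStep, if_neg hc1, if_neg hc2]]
        apply ih
        · exact h1
        · exact h2
        · exact h3
        · exact h4
        · intro w; rw [PySem.Dict.getD_insert]
          by_cases hw : w = v
          · subst hw; simp [List.count_append]; have := h5 w; omega
          · simp [hw, List.count_append]
            have : (v :: []).count w = 0 := by simp [List.count_cons]; omega
            have h5w := h5 w
            simp [List.count_singleton] at *
            omega
        · intro w; rw [PySem.Dict.getD_insert]; split <;> [omega; exact h6 w]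
        · rw [hR, pvFd_append_singleton app v (fun w => drop.getD w 0) (show drop.getD v 0 ≤ (app.count v : Int) from by have := h5 v; have := h6 v; omega),
              List.append_assoc]

-- ===== VERDICT (by name: the statement is the Claim_ definition above) =====
theorem xor_combination_list_spec : Claim_equal_xor_combination_list := by
  intro list1 list2 _
  unfold Spec_xor_combination_list xor_combination_list xor_combination_list_alt
  rw [PySem.Dict.foldl_insert_getD_add_one_eq_counter]
  have key := pvLoop_eq list2 list1 (PySem.Dict.counter list2) PySem.Dict.empty
      PySem.Dict.empty PySem.Dict.empty [] list2
      (by intro v; simp [PySem.Dict.getD_empty])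
      (by intro v; simp [PySem.Dict.getD_empty, PySem.Dict.getD_counter])
      (by intro v; rw [PySem.Dict.getD_counter]; positivity)
      (by intro v; simp [PySem.Dict.getD_empty])
      (by intro v; simp [PySem.Dict.getD_empty])
      (by intro v; simp [PySem.Dict.getD_empty])
      (by rw [pvFd_of_nonpos _ _ (by intro v; simp [PySem.Dict.getD_empty])]; simp [pvFd])
  rw [key]
  cases hst : list1.foldl pvBStep (PySem.Dict.counter list2, PySem.Dict.empty, ([] : List Int), PySem.Dict.empty, PySem.Dict.empty) with
  | mk avail' rest =>
    obtain ⟨rem', app', appcnt', drop'⟩ := rest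
    simp only
    rw [pvRebuild_eq rem' list2 PySem.Dict.empty [], pvRebuild_eq drop' app' PySem.Dict.empty]
    simp [PySem.Dict.getD_empty]
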